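-- pv_equiv track=rewrite | github.com/owenjones/advent-of-code | 2024/07/solve.py | canBuild
-- ===== SOURCE A (Python) =====
-- from collections import deque
--
-- def canBuild(equation, part2=False):
--     target, numbers = equation
--     numbers = list(reversed(numbers))
--     queue = deque([(target, 0)])
--     seen = set()
--     while queue:
--         l = queue.popleft()
--         (t, d) = l
--
--         if t == 0:
--             return target
--
--         elif l in seen or t < 0 or t > target or d >= len(numbers):
--             continue
--
--         seen.add(l)
--         queue.append((t - numbers[d], d + 1))
--
--         if t % numbers[d] == 0:
--             queue.append((int(t / numbers[d]), d + 1))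
--
--         if part2:
--             if str(t).endswith(str(numbers[d])):
--                 n = str(t)[: -len(str(numbers[d]))]
--                 if n:
--                     queue.append((int(n), d + 1))
--
--     return 0
-- ===== SOURCE B (Python) =====
-- def candidates(t, n, part2):
--     out = [t - n]
--     if t % n == 0:
--         out.append(t // n)
--     if part2:
--         s, sn = str(t), str(n)
--         if s.endswith(sn) and len(sn) < len(s):
--             out.append(int(s[:-len(sn)]))
--     return out
--
--
-- def canBuild(equation, part2=False):
--     target, numbers = equation
--     frontier = {target}
--     for n in reversed(numbers):
--         if 0 in frontier:
--             return target
--         nxt = set()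
--         for t in frontier:
--             if 0 <= t <= target:
--                 nxt.update(candidates(t, n, part2))
--         frontier = nxt
--     return target if 0 in frontier else 0
-- ===== Notes on version B (the rewrite author's own statement) =====
-- stated objective: alternative
-- what changed: Replaces A's queue-based backward BFS over (value, depth) states with a global visited set by a level-synchronous backward sweep that folds over the reversed numbers keeping one frontier set of values per depth (per-level dedup, no queue and no cross-level seen set).
-- outside the precondition, e.g. on canBuild((-1, [0]), False): A returns 0, B returns 0
import Mathlib
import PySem

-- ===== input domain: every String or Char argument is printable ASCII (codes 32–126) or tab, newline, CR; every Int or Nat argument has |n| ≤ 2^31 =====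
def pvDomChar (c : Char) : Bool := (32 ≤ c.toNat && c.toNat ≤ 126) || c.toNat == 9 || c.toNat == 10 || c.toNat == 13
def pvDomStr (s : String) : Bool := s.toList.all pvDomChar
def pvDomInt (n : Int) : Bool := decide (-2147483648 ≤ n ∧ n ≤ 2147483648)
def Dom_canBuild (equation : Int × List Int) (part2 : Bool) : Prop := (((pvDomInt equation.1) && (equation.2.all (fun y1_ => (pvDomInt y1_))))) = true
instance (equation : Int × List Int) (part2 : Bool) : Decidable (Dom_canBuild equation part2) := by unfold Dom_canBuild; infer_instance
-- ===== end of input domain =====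

-- B replaces A's queue-based backward BFS with a visited set by a level-synchronous
-- backward sweep that folds over the numbers keeping one frontier set per depth
-- (objective: alternative decomposition, same asymptotic cost).

-- ===== PORT A =====
-- the three queue.append(...) of one expansion step, in order (appending them in
-- sequence equals appending their concatenation).  `int(t / n)` is ported as floor
-- division: it sits under the guard `t % n == 0`, and for an exact quotient with
-- |t|,|n| ≤ 2^31 Python's truncated float division returns exactly that quotient.
def pushesA (part2 : Bool) (t n : Int) (d : Nat) : List (Int × Nat) :=
  [(t - n, d + 1)]
    ++ (if PySem.Int.mod t n = 0 then [(PySem.Int.floordiv t n, d + 1)] else [])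
    ++ (if part2 then
          (if PySem.Chars.endswith (PySem.Int.toChars t) (PySem.Int.toChars n) then
            (if PySem.List.slice (PySem.Int.toChars t) none
                  (some (-(((PySem.Int.toChars n).length : Nat) : Int))) ≠ [] then
              [((PySem.Int.ofChars? (PySem.List.slice (PySem.Int.toChars t) none
                  (some (-(((PySem.Int.toChars n).length : Nat) : Int))))).getD 0, d + 1)]
            else [])
          else [])
        else [])

-- the while loop of A: queue of (t, d) states, Python's `seen` set as a list that only
-- ever receives absent elements.  The loop always terminates (each iteration shrinks
-- the measure 4*(target*len - |seen|) + |queue|); the explicit fuel argument, chosen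
-- in canBuild as an upper bound of that measure, only makes the recursion structural —
-- given that much fuel the guard case is never reached (proved in the lemmas below).
def canBuildLoop (target : Int) (rev : List Int) (part2 : Bool) :
    Nat → List (Int × Nat) → List (Int × Nat) → Int
  | _, [], _ => 0
  | 0, _ :: _, _ => 0
  | fuel + 1, (t, d) :: rest, seen =>
    if t = 0 then target
    else if (t, d) ∈ seen ∨ t < 0 ∨ target < t ∨ rev.length ≤ d then
      canBuildLoop target rev part2 fuel rest seen
    else
      -- numbers[d]: in range here (¬ rev.length ≤ d), so getD is exact
      canBuildLoop target rev part2 fuel (rest ++ pushesA part2 t (rev.getD d 0) d)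
        ((t, d) :: seen)

def canBuild (equation : Int × List Int) (part2 : Bool) : Int :=
  canBuildLoop equation.1 equation.2.reverse part2
    (4 * (equation.1.toNat * equation.2.length) + 1) [(equation.1, 0)] []

-- ===== PORT B =====
-- helper candidates(t, n, part2) of Source B: the backward images of one value t
def candsB (part2 : Bool) (t n : Int) : List Int :=
  let out := [t - n]
  let out2 := if PySem.Int.mod t n = 0 then out ++ [PySem.Int.floordiv t n] else out
  if part2 then
    (if PySem.Chars.endswith (PySem.Int.toChars t) (PySem.Int.toChars n)
        && decide ((PySem.Int.toChars n).length < (PySem.Int.toChars t).length) then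
      out2 ++ [(PySem.Int.ofChars? (PySem.List.slice (PySem.Int.toChars t) none
        (some (-(((PySem.Int.toChars n).length : Nat) : Int))))).getD 0]
    else out2)
  else out2

-- the for-loop of Source B over reversed(numbers), frontier as a Python set
def loopB (target : Int) (part2 : Bool) : PySem.Set Int → List Int → Int
  | frontier, [] => if PySem.Set.contains frontier 0 then target else 0
  | frontier, n :: rs =>
    if PySem.Set.contains frontier 0 then target
    else loopB target part2
      (frontier.foldl
        (fun nxt t => if 0 ≤ t ∧ t ≤ target then PySem.Set.update nxt (candsB part2 t n) else nxt)
        PySem.Set.empty) rs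

def canBuild_alt (equation : Int × List Int) (part2 : Bool) : Int :=
  loopB equation.1 part2 (PySem.Set.ofList [equation.1]) equation.2.reverse

-- ===== PRECONDITION & SPEC =====
-- Pre_ excludes inputs whose numbers list contains 0: there Python A can reach `t % 0`
-- and raise ZeroDivisionError (B raises at the same states); on the few such inputs
-- where the 0 is never reached A returns normally and B returns the same value.
def Pre_canBuild (equation : Int × List Int) (part2 : Bool) : Prop := (0 : Int) ∉ equation.2
instance (equation : Int × List Int) (part2 : Bool) : Decidable (Pre_canBuild equation part2) := by
  unfold Pre_canBuild; infer_instance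

def pvWitness_canBuild : (Int × List Int) × Bool := ((6, [2, 3]), false)

def Spec_canBuild (equation : Int × List Int) (part2 : Bool) (out : Int) : Prop := out = canBuild_alt equation part2
instance (equation : Int × List Int) (part2 : Bool) (out : Int) : Decidable (Spec_canBuild equation part2 out) := by unfold Spec_canBuild; infer_instance

-- ===== CLAIM (what is proved, stated in full; the proofs are below) =====
def Claim_equal_canBuild : Prop := ∀ (equation : Int × List Int) (part2 : Bool), Dom_canBuild equation part2 → Pre_canBuild equation part2 → Spec_canBuild equation part2 (canBuild equation part2)

-- ===== LEMMAS AND PROOFS =====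

lemma pvToDigitsCore_ne_nil (b : Nat) : ∀ (f n : Nat) (l : List Char), l ≠ [] →
    Nat.toDigitsCore b f n l ≠ [] := by
  intro f
  induction f with
  | zero => intro n l h; simpa [Nat.toDigitsCore] using h
  | succ f ih =>
    intro n l h
    simp only [Nat.toDigitsCore]
    split
    · simp
    · exact ih _ _ (by simp)

lemma pvToChars_ne_nil (n : Int) : PySem.Int.toChars n ≠ [] := by
  simp only [PySem.Int.toChars, Nat.toDigits]
  split
  · simp
  · simp only [Nat.toDigitsCore]
    split
    · simp
    · exact pvToDigitsCore_ne_nil 10 _ _ _ (by simp)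

-- the nonempty-prefix test of A (`if n:` after slicing) coincides with the length
-- test of B (`len(sn) < len(s)`) for the nonempty strings str(t), str(n)
lemma pvGuardEq (t n : Int) :
    (PySem.List.slice (PySem.Int.toChars t) none
        (some (-(((PySem.Int.toChars n).length : Nat) : Int))) ≠ []) ↔
      (PySem.Int.toChars n).length < (PySem.Int.toChars t).length := by
  have hk : 0 < (PySem.Int.toChars n).length :=
    List.length_pos_iff.mpr (pvToChars_ne_nil n)
  have ht : 0 < (PySem.Int.toChars t).length :=
    List.length_pos_iff.mpr (pvToChars_ne_nil t)
  rw [PySem.List.slice_to_neg_natCast _ _ hk, ← List.length_pos_iff, List.length_take]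
  omega

lemma pushesA_eq (part2 : Bool) (t n : Int) (d : Nat) :
    pushesA part2 t n d = (candsB part2 t n).map (fun c => (c, d + 1)) := by
  unfold pushesA candsB
  by_cases hm : PySem.Int.mod t n = 0 <;>
    by_cases hp : part2 <;>
      by_cases he : PySem.Chars.endswith (PySem.Int.toChars t) (PySem.Int.toChars n) = true <;>
        by_cases hl : (PySem.Int.toChars n).length < (PySem.Int.toChars t).length <;>
          simp [hm, hp, he, hl, pvGuardEq]

-- the decision predicate both programs compute: can t be reduced to 0 using the
-- remaining (already reversed) numbers, all intermediate values staying in [0, target]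
def goodB (target : Int) (part2 : Bool) : Int → List Int → Bool
  | t, [] => t == 0
  | t, n :: rs =>
    t == 0 || (decide (0 ≤ t) && decide (t ≤ target)
      && (candsB part2 t n).any (fun c => goodB target part2 c rs))

lemma goodB_zero (target : Int) (part2 : Bool) (rs : List Int) :
    goodB target part2 0 rs = true := by
  cases rs <;> simp [goodB]

-- invariant of A's loop: a good state that went into `seen` always has a good state
-- of strictly larger depth still waiting in the queue
def InvJ (target : Int) (rev : List Int) (part2 : Bool) (queue seen : List (Int × Nat)) : Prop :=
  ∀ p ∈ seen, goodB target part2 p.1 (rev.drop p.2) = true →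
    ∃ q ∈ queue, goodB target part2 q.1 (rev.drop q.2) = true ∧ p.2 < q.2

lemma goodB_false_oob (target : Int) (part2 : Bool) (rev : List Int) {t : Int} {d : Nat}
    (ht : ¬ t = 0) (h : t < 0 ∨ target < t ∨ rev.length ≤ d) :
    goodB target part2 t (rev.drop d) = false := by
  have h1 : (t == 0) = false := by simp [ht]
  rcases Nat.lt_or_ge d rev.length with hd | hd
  · rw [List.drop_eq_getElem_cons hd]
    have h' : t < 0 ∨ target < t := by
      rcases h with h | h | h
      exacts [Or.inl h, Or.inr h, absurd h (by omega)]
    rcases h' with h0 | h0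
    · have h2 : decide ((0 : Int) ≤ t) = false := by simp; omega
      simp [goodB, h1, h2]
    · have h2 : decide (t ≤ target) = false := by simp; omega
      simp [goodB, h1, h2]
  · rw [List.drop_eq_nil_iff.mpr (by omega)]
    simp [goodB, ht]

lemma pvSeenBound {target : Int} {rev : List Int} (seen : List (Int × Nat))
    (hsub : ∀ p ∈ seen, 1 ≤ p.1 ∧ p.1 ≤ target ∧ p.2 < rev.length)
    (hnd : seen.Nodup) : seen.length ≤ target.toNat * rev.length := by
  classical
  have hsubset : seen.toFinset ⊆ Finset.Icc (1 : Int) target ×ˢ Finset.range rev.length := by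
    intro p hp
    rcases hsub p (List.mem_toFinset.mp hp) with ⟨h1, h2, h3⟩
    simp only [Finset.mem_product, Finset.mem_Icc, Finset.mem_range]
    exact ⟨⟨h1, h2⟩, h3⟩
  have hcard := Finset.card_le_card hsubset
  rw [List.toFinset_card_of_nodup hnd, Finset.card_product, Int.card_Icc] at hcard
  have : (target + 1 - 1).toNat = target.toNat := by omega
  rw [this, Finset.card_range] at hcard
  exact hcard

lemma pvSeenExtend {target : Int} {rev : List Int} {seen : List (Int × Nat)} {t : Int} {d : Nat}
    (hsub : ∀ p ∈ seen, 1 ≤ p.1 ∧ p.1 ≤ target ∧ p.2 < rev.length) (hnd : seen.Nodup)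
    (ht : ¬ t = 0) (hpr : ¬((t, d) ∈ seen ∨ t < 0 ∨ target < t ∨ rev.length ≤ d)) :
    (∀ p ∈ (t, d) :: seen, 1 ≤ p.1 ∧ p.1 ≤ target ∧ p.2 < rev.length) ∧
      ((t, d) :: seen).Nodup ∧ seen.length + 1 ≤ target.toNat * rev.length := by
  push_neg at hpr
  obtain ⟨h1, h2, h3, h4⟩ := hpr
  have hs : ∀ p ∈ (t, d) :: seen, 1 ≤ p.1 ∧ p.1 ≤ target ∧ p.2 < rev.length := by
    intro p hp
    rcases List.mem_cons.mp hp with h | h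
    · subst h; exact ⟨by omega, by omega, by omega⟩
    · exact hsub p h
  have hn : ((t, d) :: seen).Nodup := List.nodup_cons.mpr ⟨h1, hnd⟩
  have hb := pvSeenBound ((t, d) :: seen) hs hn
  simp only [List.length_cons] at hb
  exact ⟨hs, hn, by omega⟩

lemma length_pushesA (part2 : Bool) (t n : Int) (d : Nat) : (pushesA part2 t n d).length ≤ 3 := by
  unfold pushesA; split_ifs <;> simp

lemma loopA_char (target : Int) (rev : List Int) (part2 : Bool) :
    ∀ (fuel : Nat) (queue seen : List (Int × Nat)),
      (∀ p ∈ seen, 1 ≤ p.1 ∧ p.1 ≤ target ∧ p.2 < rev.length) → seen.Nodup →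
      InvJ target rev part2 queue seen →
      4 * (target.toNat * rev.length - seen.length) + queue.length ≤ fuel →
      canBuildLoop target rev part2 fuel queue seen =
        if queue.any (fun q => goodB target part2 q.1 (rev.drop q.2)) then target else 0 := by
  intro fuel
  induction fuel with
  | zero =>
    intro queue seen _ _ _ hm
    cases queue with
    | nil => rw [canBuildLoop]; simp
    | cons hd rest => exfalso; simp only [List.length_cons] at hm; omega
  | succ fuel ih =>
    intro queue seen hsub hnd hJ hm
    cases queue with
    | nil => rw [canBuildLoop]; simp
    | cons hd rest =>
      obtain ⟨t, d⟩ := hd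
      simp only [List.length_cons] at hm
      rw [canBuildLoop]
      by_cases ht : t = 0
      · rw [if_pos ht]
        subst ht
        simp [goodB_zero]
      · rw [if_neg ht]
        by_cases hpr : (t, d) ∈ seen ∨ t < 0 ∨ target < t ∨ rev.length ≤ d
        · -- prune: the popped state is either already expanded or out of bounds
          rw [if_pos hpr]
          have hgood : goodB target part2 t (rev.drop d) = true →
              ∃ q ∈ rest, goodB target part2 q.1 (rev.drop q.2) = true := by
            intro hg
            have hmem : (t, d) ∈ seen := by
              rcases hpr with h | h
              · exact h
              · exact absurd hg (by rw [goodB_false_oob target part2 rev ht h]; simp)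
            obtain ⟨q, hq, hqg, hqd⟩ := hJ (t, d) hmem hg
            rcases List.mem_cons.mp hq with h | h
            · exfalso; rw [h] at hqd; omega
            · exact ⟨q, h, hqg⟩
          have hJ' : InvJ target rev part2 rest seen := by
            intro p hp hpg
            obtain ⟨q, hq, hqg, hqd⟩ := hJ p hp hpg
            rcases List.mem_cons.mp hq with h | h
            · -- the witness was the popped state; hop once more through the invariant
              rw [h] at hqg hqd
              have hmem : (t, d) ∈ seen := by
                rcases hpr with h2 | h2
                · exact h2
                · exact absurd hqg (by rw [goodB_false_oob target part2 rev ht h2]; simp)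
              obtain ⟨q', hq', hq'g, hq'd⟩ := hJ (t, d) hmem hqg
              rcases List.mem_cons.mp hq' with h2 | h2
              · exfalso; rw [h2] at hq'd; omega
              · exact ⟨q', h2, hq'g, by omega⟩
            · exact ⟨q, h, hqg, hqd⟩
          rw [ih rest seen hsub hnd hJ' (by omega)]
          congr 1
          rw [List.any_cons]
          by_cases hg : goodB target part2 t (rev.drop d) = true
          · obtain ⟨q, hq, hqg⟩ := hgood hg
            have hr : rest.any (fun q => goodB target part2 q.1 (rev.drop q.2)) = true :=
              List.any_eq_true.mpr ⟨q, hq, hqg⟩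
            rw [hr]; simp [hg]
          · rw [Bool.not_eq_true] at hg; simp [hg]
        · -- expand
          rw [if_neg hpr]
          have hext := pvSeenExtend hsub hnd ht hpr
          have h0 : 0 ≤ t := by by_contra h; exact hpr (Or.inr (Or.inl (by omega)))
          have hle : t ≤ target := by
            by_contra h; exact hpr (Or.inr (Or.inr (Or.inl (by omega))))
          have hdlt : d < rev.length := by
            by_contra h; exact hpr (Or.inr (Or.inr (Or.inr (by omega))))
          have hget : rev.getD d 0 = rev[d] := List.getD_eq_getElem rev 0 hdlt
          have hdrop : rev.drop d = rev[d] :: rev.drop (d + 1) := List.drop_eq_getElem_cons hdlt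
          have hb0 : decide ((0 : Int) ≤ t) = true := by simpa using h0
          have hb1 : decide (t ≤ target) = true := by simpa using hle
          have hb2 : (t == 0) = false := by simp [ht]
          -- the pushed successors carry exactly the goodness of the popped state
          have hkey : goodB target part2 t (rev.drop d) =
              (candsB part2 t (rev.getD d 0)).any
                (fun c => goodB target part2 c (rev.drop (d + 1))) := by
            rw [hdrop, hget]
            simp [goodB, hb0, hb1, hb2]
          have hJ' : InvJ target rev part2 (rest ++ pushesA part2 t (rev.getD d 0) d)
              ((t, d) :: seen) := by
            have hfromgood : goodB target part2 t (rev.drop d) = true →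
                ∃ q ∈ pushesA part2 t (rev.getD d 0) d,
                  goodB target part2 q.1 (rev.drop q.2) = true ∧ q.2 = d + 1 := by
              intro hg
              rw [hkey] at hg
              obtain ⟨c, hc, hcg⟩ := List.any_eq_true.mp hg
              refine ⟨(c, d + 1), ?_, hcg, rfl⟩
              rw [pushesA_eq]
              exact List.mem_map.mpr ⟨c, hc, rfl⟩
            intro p hp hpg
            rcases List.mem_cons.mp hp with h | h
            · rw [h] at hpg ⊢
              obtain ⟨q, hq, hqg, hq2⟩ := hfromgood hpg
              exact ⟨q, List.mem_append_right _ hq, hqg, by omega⟩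
            · obtain ⟨q, hq, hqg, hqd⟩ := hJ p h hpg
              rcases List.mem_cons.mp hq with h2 | h2
              · rw [h2] at hqg hqd
                obtain ⟨q', hq', hq'g, hq'2⟩ := hfromgood hqg
                exact ⟨q', List.mem_append_right _ hq', hq'g, by omega⟩
              · exact ⟨q, List.mem_append_left _ h2, hqg, hqd⟩
          have hmea : 4 * (target.toNat * rev.length - ((t, d) :: seen).length) +
              (rest ++ pushesA part2 t (rev.getD d 0) d).length ≤ fuel := by
            have h2 := length_pushesA part2 t (rev.getD d 0) d
            have h3 := hext.2.2
            simp only [List.length_cons, List.length_append]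
            omega
          rw [ih _ _ hext.1 hext.2.1 hJ' hmea]
          congr 1
          rw [List.any_append, List.any_cons]
          have hp2 : (pushesA part2 t (rev.getD d 0) d).any
              (fun q => goodB target part2 q.1 (rev.drop q.2)) =
                goodB target part2 t (rev.drop d) := by
            rw [pushesA_eq, List.any_map, hkey]
            rfl
          rw [hp2]
          cases hh : goodB target part2 t (rev.drop d) <;>
            cases hh2 : rest.any (fun q => goodB target part2 q.1 (rev.drop q.2)) <;>
              simp [hh, hh2]

lemma mem_nextB (target : Int) (part2 : Bool) (n : Int) (F : List Int)
    (init : PySem.Set Int) (x : Int) :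
    x ∈ F.foldl
        (fun nxt t => if 0 ≤ t ∧ t ≤ target then PySem.Set.update nxt (candsB part2 t n) else nxt)
        init ↔
      x ∈ init ∨ ∃ t ∈ F, (0 ≤ t ∧ t ≤ target) ∧ x ∈ candsB part2 t n := by
  induction F generalizing init with
  | nil => simp
  | cons a F ih =>
    simp only [List.foldl_cons, ih]
    by_cases h : 0 ≤ a ∧ a ≤ target <;>
      simp [h, PySem.Set.mem_update] <;> tauto

lemma loopB_char (target : Int) (part2 : Bool) :
    ∀ (rs : List Int) (F : PySem.Set Int),
      loopB target part2 F rs = if F.any (fun t => goodB target part2 t rs) then target else 0 := by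
  intro rs
  induction rs with
  | nil =>
    intro F
    simp only [loopB]
    congr 1
    refine propext ?_
    simp only [PySem.Set.contains, List.contains_iff_mem, List.any_eq_true, goodB, beq_iff_eq]
    constructor
    · intro h; exact ⟨0, h, rfl⟩
    · rintro ⟨x, hx, e⟩; exact e ▸ hx
  | cons n rs ih =>
    intro F
    by_cases h0 : (0 : Int) ∈ F
    · have : F.any (fun t => goodB target part2 t (n :: rs)) = true :=
        List.any_eq_true.mpr ⟨0, h0, goodB_zero target part2 _⟩
      simp [loopB, PySem.Set.contains, List.contains_iff_mem, h0, this]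
    · rw [loopB]
      rw [if_neg (by simp [PySem.Set.contains, List.contains_iff_mem, h0])]
      rw [ih]
      have hiff :
          ((F.foldl (fun nxt t =>
                if 0 ≤ t ∧ t ≤ target then PySem.Set.update nxt (candsB part2 t n) else nxt)
              PySem.Set.empty).any (fun x => goodB target part2 x rs) = true) ↔
            (F.any (fun t => goodB target part2 t (n :: rs)) = true) := by
        simp only [List.any_eq_true]
        constructor
        · rintro ⟨x, hx, hxg⟩
          rw [mem_nextB] at hx
          rcases hx with hx | ⟨t, htF, ⟨hb1, hb2⟩, hc⟩
          · simp [PySem.Set.empty] at hx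
          · refine ⟨t, htF, ?_⟩
            simp only [goodB, Bool.or_eq_true, Bool.and_eq_true, decide_eq_true_eq]
            exact Or.inr ⟨⟨hb1, hb2⟩, List.any_eq_true.mpr ⟨x, hc, hxg⟩⟩
        · rintro ⟨t, htF, htg⟩
          have htne : t ≠ 0 := fun h => h0 (h ▸ htF)
          simp only [goodB, Bool.or_eq_true, Bool.and_eq_true, decide_eq_true_eq,
            beq_iff_eq] at htg
          rcases htg with h | ⟨⟨hb1, hb2⟩, hany⟩
          · exact absurd h htne
          · obtain ⟨c, hc, hcg⟩ := List.any_eq_true.mp hany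
            exact ⟨c, (mem_nextB target part2 n F PySem.Set.empty c).mpr
              (Or.inr ⟨t, htF, ⟨hb1, hb2⟩, hc⟩), hcg⟩
      congr 1
      exact propext hiff

-- ===== VERDICT (by name: the statement is the Claim_ definition above) =====
theorem canBuild_spec : Claim_equal_canBuild := by
  intro equation part2 _hdom _hpre
  unfold Spec_canBuild
  obtain ⟨target, numbers⟩ := equation
  unfold canBuild canBuild_alt
  rw [loopA_char target numbers.reverse part2 (4 * (target.toNat * numbers.length) + 1)
    [(target, 0)] [] (fun p hp => (List.not_mem_nil hp).elim) List.nodup_nil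
    (fun p hp => (List.not_mem_nil hp).elim)
    (by simp only [List.length_reverse, List.length_cons, List.length_nil]; omega)]
  rw [loopB_char target part2 numbers.reverse (PySem.Set.ofList [target])]
  have : PySem.Set.ofList [target] = [target] := rfl
  rw [this]
  simp [List.any_cons]
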